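-- pv_equiv track=rewrite | github.com/Kostydenis/random-process-generator | part approx/index.py | max_diff_val
-- ===== SOURCE A (Python) =====
-- def max_diff_val(num, lst):
-- 	max_val = 0
-- 	max_ind = 0
-- 	for it, val in enumerate(lst):
-- 		if (max(val, num) - min(val, num) > max_val):
-- 			max_val = max(val, num) - min(val, num)
-- 			max_ind = it
-- 	return lst[max_ind]
-- ===== SOURCE B (Python) =====
-- def max_diff_val(num, lst):
--     mx = max(lst)
--     mn = min(lst)
--     if mx - num > num - mn:
--         return mx
--     if num - mn > mx - num:
--         return mn
--     return mx if lst.index(mx) <= lst.index(mn) else mn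
-- ===== Notes on version B (the rewrite author's own statement) =====
-- stated objective: simpler
-- what changed: Instead of scanning with enumerate while tracking a running best index, B observes the farthest element from num is an extreme of the list: it takes max(lst) and min(lst), compares their distances to num, and breaks ties by first occurrence index.
import Mathlib
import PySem

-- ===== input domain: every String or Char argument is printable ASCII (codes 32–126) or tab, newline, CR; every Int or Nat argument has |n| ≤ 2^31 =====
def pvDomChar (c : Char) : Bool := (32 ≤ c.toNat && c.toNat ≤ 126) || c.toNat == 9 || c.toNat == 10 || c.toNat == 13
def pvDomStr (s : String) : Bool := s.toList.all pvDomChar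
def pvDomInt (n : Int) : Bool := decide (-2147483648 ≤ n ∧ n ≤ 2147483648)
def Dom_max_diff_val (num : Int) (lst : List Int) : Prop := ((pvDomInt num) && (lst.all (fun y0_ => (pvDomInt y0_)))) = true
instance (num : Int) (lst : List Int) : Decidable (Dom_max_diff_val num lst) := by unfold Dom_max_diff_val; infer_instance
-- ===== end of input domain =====

-- B replaces A's enumerate-scan with a max/min-extremes comparison (first-occurrence tie-break); objective: simpler. Pre_ excludes the empty list, on which A raises IndexError (B raises ValueError).


-- ===== PORT A =====
def max_diff_val (num : Int) (lst : List Int) : Int :=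
  let r := (PySem.List.enumerate lst 0).foldl
    (fun (acc : Int × Int) (p : Int × Int) =>
      if max p.2 num - min p.2 num > acc.1 then (max p.2 num - min p.2 num, p.1) else acc)
    (0, 0)
  PySem.List.pyGetD lst r.2 0    -- lst[max_ind]; in range for every nonempty lst (Pre_)

-- ===== PORT B =====
def max_diff_val_alt (num : Int) (lst : List Int) : Int :=
  let mx := (PySem.List.max? lst (fun x => x)).getD 0
  let mn := (PySem.List.min? lst (fun x => x)).getD 0
  if mx - num > num - mn then mx
  else if num - mn > mx - num then mn
  else if (PySem.List.index? lst mx).getD 0 ≤ (PySem.List.index? lst mn).getD 0 then mx else mn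

-- ===== PRECONDITION & SPEC =====
-- Pre_ excludes exactly the empty list, on which Python A raises IndexError (and B raises ValueError).
def Pre_max_diff_val (num : Int) (lst : List Int) : Prop := lst ≠ []
instance (num : Int) (lst : List Int) : Decidable (Pre_max_diff_val num lst) := by unfold Pre_max_diff_val; infer_instance
def pvWitness_max_diff_val : Int × List Int := (1, [3, -4, 5])

def Spec_max_diff_val (num : Int) (lst : List Int) (out : Int) : Prop := out = max_diff_val_alt num lst
instance (num : Int) (lst : List Int) (out : Int) : Decidable (Spec_max_diff_val num lst out) := by unfold Spec_max_diff_val; infer_instance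

-- ===== CLAIM (what is proved, stated in full; the proofs are below) =====
def Claim_equal_max_diff_val : Prop := ∀ (num : Int) (lst : List Int), Dom_max_diff_val num lst → Pre_max_diff_val num lst → Spec_max_diff_val num lst (max_diff_val num lst)

-- ===== LEMMAS AND PROOFS =====

-- d num v = |v - num| as A computes it
def ddv (num v : Int) : Int := max v num - min v num

-- value-level version of A's fold step
def gstep (num : Int) (b v : Int) : Int := if ddv num v > ddv num b then v else b

-- A's step over enumerated pairs
def astep (num : Int) (acc : Int × Int) (p : Int × Int) : Int × Int :=
  if max p.2 num - min p.2 num > acc.1 then (max p.2 num - min p.2 num, p.1) else acc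

lemma pyGetD_append_len (pre : List Int) (v : Int) (t : List Int) :
    PySem.List.pyGetD (pre ++ v :: t) (pre.length : Int) 0 = v := by
  simp [PySem.List.pyGetD_natCast, List.getD, List.getElem?_append_right (Nat.le_refl _)]

-- simulation: A's index-tracking fold over `enumerate` computes the same best value
-- as the value-level fold, and its final index points at that value.
lemma simL (num : Int) : ∀ (t pre : List Int) (b : Int) (i : Int),
    0 ≤ i → i < (pre.length : Int) → PySem.List.pyGetD (pre ++ t) i 0 = b →
    ∃ j : Int, (PySem.List.enumerate t (pre.length : Int)).foldl (astep num) (ddv num b, i)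
        = (ddv num (t.foldl (gstep num) b), j)
      ∧ 0 ≤ j ∧ j < ((pre ++ t).length : Int) ∧ PySem.List.pyGetD (pre ++ t) j 0 = t.foldl (gstep num) b
  | [], pre, b, i => by
    intro h0 hlt hget
    refine ⟨i, ?_, h0, ?_, ?_⟩
    · simp [PySem.List.enumerate_nil]
    · simpa using hlt
    · simpa using hget
  | v :: t, pre, b, i => by
    intro h0 hlt hget
    rw [PySem.List.enumerate_cons]
    by_cases hc : ddv num v > ddv num b
    · have hstep : astep num (ddv num b, i) ((pre.length : Int), v) = (ddv num v, (pre.length : Int)) := by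
        simp only [astep, ddv] at hc ⊢
        rw [if_pos hc]
      have ih := simL num t (pre ++ [v]) v (pre.length : Int)
        (by positivity) (by simp)
        (by rw [List.append_assoc, List.singleton_append]; exact pyGetD_append_len pre v t)
      obtain ⟨j, hj, hj0, hjlt, hjget⟩ := ih
      rw [List.append_assoc, List.singleton_append] at hjlt hjget
      have hlen : ((pre ++ [v]).length : Int) = (pre.length : Int) + 1 := by simp
      rw [hlen] at hj
      refine ⟨j, ?_, hj0, hjlt, ?_⟩
      · rw [List.foldl_cons, hstep, hj]
        simp [gstep, hc]
      · rw [hjget]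
        simp [gstep, hc]
    · have hstep : astep num (ddv num b, i) ((pre.length : Int), v) = (ddv num b, i) := by
        simp only [astep, ddv] at hc ⊢
        rw [if_neg hc]
      have ih := simL num t (pre ++ [v]) b i
        h0 (by simp; omega) (by rw [List.append_assoc, List.singleton_append]; exact hget)
      obtain ⟨j, hj, hj0, hjlt, hjget⟩ := ih
      rw [List.append_assoc, List.singleton_append] at hjlt hjget
      have hlen : ((pre ++ [v]).length : Int) = (pre.length : Int) + 1 := by simp
      rw [hlen] at hj
      refine ⟨j, ?_, hj0, hjlt, ?_⟩
      · rw [List.foldl_cons, hstep, hj]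
        simp [gstep, hc]
      · rw [hjget]
        simp [gstep, hc]

lemma A_eq_fold (num h : Int) (t : List Int) :
    max_diff_val num (h :: t) = t.foldl (gstep num) h := by
  obtain ⟨j, hj, hj0, hjlt, hjget⟩ :=
    simL num t [h] h 0 (le_refl 0) (by simp) (by simp [PySem.List.pyGetD_natCast])
  have hA : max_diff_val num (h :: t)
      = PySem.List.pyGetD (h :: t) ((PySem.List.enumerate (h :: t) 0).foldl (astep num) (0, 0)).2 0 := rfl
  rw [hA, PySem.List.enumerate_cons, List.foldl_cons]
  have hfirst : astep num (0, 0) ((0 : Int), h) = (ddv num h, 0) := by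
    simp only [astep, ddv]
    split_ifs with hcond
    · rfl
    · have hz : max h num - min h num = 0 := by omega
      rw [hz]
  rw [hfirst]
  simp only [List.singleton_append] at hj hjget
  norm_num at hj
  norm_num
  rw [hj]
  exact hjget

-- c is the FIRST element of lst at maximal distance from num
def IFA (num : Int) (lst : List Int) (c : Int) : Prop :=
  ∃ t1 t2, lst = t1 ++ c :: t2 ∧ (∀ v ∈ t1, ddv num v < ddv num c) ∧ ∀ v ∈ lst, ddv num v ≤ ddv num c

lemma gstep_pos {num b v : Int} (h : ddv num v > ddv num b) : gstep num b v = v := by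
  simp [gstep, h]

lemma gstep_neg {num b v : Int} (h : ¬ ddv num v > ddv num b) : gstep num b v = b := by
  simp [gstep, h]

lemma fold_IFA (num : Int) : ∀ (t : List Int) (b : Int), IFA num (b :: t) (t.foldl (gstep num) b)
  | [], b => ⟨[], [], by simp, by simp, by simp⟩
  | v :: t, b => by
    rw [List.foldl_cons]
    by_cases hc : ddv num v > ddv num b
    · rw [gstep_pos hc]
      obtain ⟨t1, t2, he, hlt, hle⟩ := fold_IFA num t v
      have hcle : ddv num v ≤ ddv num (t.foldl (gstep num) v) := hle v (by simp)
      refine ⟨b :: t1, t2, by rw [List.cons_append, ← he], ?_, ?_⟩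
      · intro u hu
        rcases List.mem_cons.mp hu with rfl | hu
        · omega
        · exact hlt u hu
      · intro u hu
        rcases List.mem_cons.mp hu with rfl | hu
        · omega
        · exact hle u hu
    · rw [gstep_neg hc]
      obtain ⟨t1, t2, he, hlt, hle⟩ := fold_IFA num t b
      cases t1 with
      | nil =>
        have hb : b = t.foldl (gstep num) b := by simpa using congrArg List.headI he
        have ht : t = t2 := by simpa [← hb] using congrArg List.tail he
        refine ⟨[], v :: t2, ?_, by simp, ?_⟩
        · rw [← hb, ← ht]; rfl
        · intro u hu
          rcases List.mem_cons.mp hu with rfl | hu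
          · exact le_of_eq (congrArg (ddv num) hb)
          · rcases List.mem_cons.mp hu with rfl | hu
            · rw [← hb]; omega
            · exact hle u (by simp [hu])
      | cons b0 t1' =>
        have hb0 : b = b0 := by simpa using congrArg List.headI he
        rw [← hb0] at he hlt
        have ht : t = t1' ++ (t.foldl (gstep num) b) :: t2 := by
          simpa using congrArg List.tail he
        refine ⟨b :: v :: t1', t2, by rw [List.cons_append, List.cons_append, ← ht], ?_, ?_⟩
        · intro u hu
          rcases List.mem_cons.mp hu with rfl | hu
          · exact hlt u (by simp)
          · rcases List.mem_cons.mp hu with rfl | hu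
            · have hbc := hlt b (by simp)
              omega
            · exact hlt u (by simp [hu])
        · intro u hu
          rcases List.mem_cons.mp hu with rfl | hu
          · exact hle u (by simp)
          · rcases List.mem_cons.mp hu with rfl | hu
            · have hbc := hlt b (by simp)
              omega
            · exact hle u (by simp [hu])

lemma getApp (u : Int) (l1 l2 : List Int) : (l1 ++ u :: l2)[l1.length]? = some u := by
  rw [List.getElem?_append_right (Nat.le_refl _)]
  simp

lemma IFA_unique (num : Int) (lst : List Int) (c c' : Int)
    (h1 : IFA num lst c) (h2 : IFA num lst c') : c = c' := by
  obtain ⟨t1, t2, e1, lt1, le1⟩ := h1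
  obtain ⟨s1, s2, e2, lt2, le2⟩ := h2
  have hcc1 : ddv num c ≤ ddv num c' :=
    le2 c (by rw [e1]; exact List.mem_append.mpr (Or.inr (by simp)))
  have hcc2 : ddv num c' ≤ ddv num c :=
    le1 c' (by rw [e2]; exact List.mem_append.mpr (Or.inr (by simp)))
  have e12 : t1 ++ c :: t2 = s1 ++ c' :: s2 := by rw [← e1, ← e2]
  rcases lt_trichotomy t1.length s1.length with hl | hl | hl
  · exfalso
    have hg : (s1 ++ c' :: s2)[t1.length]? = some c := by rw [← e12]; exact getApp c t1 t2
    rw [List.getElem?_append_left hl] at hg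
    have := lt2 c (List.mem_of_getElem? hg)
    omega
  · have hg : (s1 ++ c' :: s2)[t1.length]? = some c := by rw [← e12]; exact getApp c t1 t2
    rw [hl, getApp c' s1 s2] at hg
    exact (Option.some_inj.mp hg).symm
  · exfalso
    have hg : (t1 ++ c :: t2)[s1.length]? = some c' := by rw [e12]; exact getApp c' s1 s2
    rw [List.getElem?_append_left hl] at hg
    have := lt1 c' (List.mem_of_getElem? hg)
    omega

lemma mem_pre_ne (pre suf : List Int) (w v : Int) (k : Nat)
    (hidx : PySem.List.index? (pre ++ w :: suf) v = some k)
    (hlen : pre.length ≤ k) (hv : v ∈ pre) : False := by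
  obtain ⟨hk, _, hall⟩ := PySem.List.getElem_of_index?_eq_some hidx
  obtain ⟨j, hj, hjv⟩ := List.mem_iff_getElem.mp hv
  exact hall j (by omega) (by rw [List.getElem_append_left hj]; exact hjv)

lemma B_IFA (num : Int) (lst : List Int) (hne : lst ≠ []) :
    IFA num lst (max_diff_val_alt num lst) := by
  obtain ⟨mx, hmx⟩ : ∃ mx, PySem.List.max? lst (fun x => x) = some mx := by
    cases h : PySem.List.max? lst (fun x => x) with
    | none => exact absurd ((PySem.List.max?_eq_none_iff _ _).mp h) hne
    | some m => exact ⟨m, rfl⟩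
  obtain ⟨mn, hmn⟩ : ∃ mn, PySem.List.min? lst (fun x => x) = some mn := by
    cases h : PySem.List.min? lst (fun x => x) with
    | none => exact absurd ((PySem.List.min?_eq_none_iff _ _).mp h) hne
    | some m => exact ⟨m, rfl⟩
  have hmxmem : mx ∈ lst := PySem.List.max?_mem hmx
  have hmnmem : mn ∈ lst := PySem.List.min?_mem hmn
  have hmax : ∀ y ∈ lst, y ≤ mx := fun y hy => PySem.List.max?_isMax hmx y hy
  have hmin : ∀ y ∈ lst, mn ≤ y := fun y hy => PySem.List.min?_isMin hmn y hy
  obtain ⟨kx, hkx⟩ : ∃ k, PySem.List.index? lst mx = some k := by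
    cases h : PySem.List.index? lst mx with
    | none => exact absurd ((PySem.List.index?_eq_none_iff _ _).mp h) (by simp; exact hmxmem)
    | some k => exact ⟨k, rfl⟩
  obtain ⟨kn, hkn⟩ : ∃ k, PySem.List.index? lst mn = some k := by
    cases h : PySem.List.index? lst mn with
    | none => exact absurd ((PySem.List.index?_eq_none_iff _ _).mp h) (by simp; exact hmnmem)
    | some k => exact ⟨k, rfl⟩
  have hB : max_diff_val_alt num lst =
      (if mx - num > num - mn then mx
       else if num - mn > mx - num then mn
       else if kx ≤ kn then mx else mn) := by
    have hkx' : List.idxOf? mx lst = some kx := by rw [← PySem.List.index?_eq_idxOf?]; exact hkx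
    have hkn' : List.idxOf? mn lst = some kn := by rw [← PySem.List.index?_eq_idxOf?]; exact hkn
    simp [max_diff_val_alt, hmx, hmn, hkx', hkn']
  rw [hB]
  obtain ⟨prex, sufx, hsplitx, hlenx, hninx⟩ := (PySem.List.index?_eq_some_iff _ _ _).mp hkx
  obtain ⟨pren, sufn, hsplitn, hlenn, hninn⟩ := (PySem.List.index?_eq_some_iff _ _ _).mp hkn
  by_cases h1 : mx - num > num - mn
  · rw [if_pos h1]
    refine ⟨prex, sufx, hsplitx, ?_, ?_⟩
    · intro v hv
      have hvmx : v ≤ mx := hmax v (by rw [hsplitx]; exact List.mem_append.mpr (Or.inl hv))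
      have hvmn : mn ≤ v := hmin v (by rw [hsplitx]; exact List.mem_append.mpr (Or.inl hv))
      have hvne : v ≠ mx := fun h => hninx (h ▸ hv)
      unfold ddv; omega
    · intro v hv
      have hvmx := hmax v hv
      have hvmn := hmin v hv
      unfold ddv; omega
  · rw [if_neg h1]
    by_cases h2 : num - mn > mx - num
    · rw [if_pos h2]
      refine ⟨pren, sufn, hsplitn, ?_, ?_⟩
      · intro v hv
        have hvmx : v ≤ mx := hmax v (by rw [hsplitn]; exact List.mem_append.mpr (Or.inl hv))
        have hvmn : mn ≤ v := hmin v (by rw [hsplitn]; exact List.mem_append.mpr (Or.inl hv))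
        have hvne : v ≠ mn := fun h => hninn (h ▸ hv)
        unfold ddv; omega
      · intro v hv
        have hvmx := hmax v hv
        have hvmn := hmin v hv
        unfold ddv; omega
    · rw [if_neg h2]
      have hmnmx : mn ≤ mx := hmax mn hmnmem
      have htie : mx - num = num - mn := by omega
      by_cases h3 : kx ≤ kn
      · rw [if_pos h3]
        refine ⟨prex, sufx, hsplitx, ?_, ?_⟩
        · intro v hv
          have hvmx : v ≤ mx := hmax v (by rw [hsplitx]; exact List.mem_append.mpr (Or.inl hv))
          have hvmn : mn ≤ v := hmin v (by rw [hsplitx]; exact List.mem_append.mpr (Or.inl hv))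
          have hvnex : v ≠ mx := fun h => hninx (h ▸ hv)
          have hvnen : v ≠ mn := by
            intro h
            exact mem_pre_ne prex sufx mx mn kn (by rw [← hsplitx]; exact hkn) (by omega) (h ▸ hv)
          unfold ddv; omega
        · intro v hv
          have hvmx := hmax v hv
          have hvmn := hmin v hv
          unfold ddv; omega
      · rw [if_neg h3]
        refine ⟨pren, sufn, hsplitn, ?_, ?_⟩
        · intro v hv
          have hvmx : v ≤ mx := hmax v (by rw [hsplitn]; exact List.mem_append.mpr (Or.inl hv))
          have hvmn : mn ≤ v := hmin v (by rw [hsplitn]; exact List.mem_append.mpr (Or.inl hv))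
          have hvnen : v ≠ mn := fun h => hninn (h ▸ hv)
          have hvnex : v ≠ mx := by
            intro h
            exact mem_pre_ne pren sufn mn mx kx (by rw [← hsplitn]; exact hkx) (by omega) (h ▸ hv)
          unfold ddv; omega
        · intro v hv
          have hvmx := hmax v hv
          have hvmn := hmin v hv
          unfold ddv; omega

-- ===== VERDICT (by name: the statement is the Claim_ definition above) =====
theorem max_diff_val_spec : Claim_equal_max_diff_val := by
  intro num lst _hdom hpre
  unfold Spec_max_diff_val
  cases lst with
  | nil => exact absurd rfl hpre
  | cons h t =>
    rw [A_eq_fold]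
    exact IFA_unique num (h :: t) _ _ (fold_IFA num t h) (B_IFA num (h :: t) (by simp))
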